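-- pv_equiv track=rewrite | github.com/huang-laboratory/EM2NA | sample.py | get_subarrays
-- ===== SOURCE A (Python) =====
-- def get_subarrays(arr):
--     subarrays = []
--     subarray = [arr[0]]
--
--     for i in range(1, len(arr)):
--         if arr[i] == arr[i - 1] + 1:
--             subarray.append(arr[i])
--         else:
--             subarrays.append(subarray)
--             subarray = [arr[i]]
--
--     subarrays.append(subarray)
--     return subarrays
-- ===== SOURCE B (Python) =====
-- def get_subarrays(arr):
--     # Two staged passes: (1) compute the list of cut indices, i.e. positions
--     # where a new maximal consecutive run starts (i == 0 or arr[i] != arr[i-1]+1),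
--     # (2) slice arr between adjacent cuts.
--     n = len(arr)
--     cuts = [i for i in range(n) if i == 0 or arr[i] != arr[i - 1] + 1] + [n]
--     return [arr[a:b] for a, b in zip(cuts, cuts[1:])]
-- ===== Notes on version B (the rewrite author's own statement) =====
-- stated objective: alternative
-- what changed: Replaces A's single forward pass with a current-run accumulator and flush appends by two staged passes: first build the list of cut indices (positions starting a new consecutive run, detected by a range filter), then slice the array between adjacent cut pairs via zip; no run accumulator is maintained.
-- outside the precondition, e.g. on get_subarrays([]): A raises IndexError, B returns []
-- crash fix: On the empty list A raises IndexError (it evaluates arr[0] before the loop) while B returns []. — e.g. on get_subarrays([]): A raises IndexError, B returns []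
import Mathlib
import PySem

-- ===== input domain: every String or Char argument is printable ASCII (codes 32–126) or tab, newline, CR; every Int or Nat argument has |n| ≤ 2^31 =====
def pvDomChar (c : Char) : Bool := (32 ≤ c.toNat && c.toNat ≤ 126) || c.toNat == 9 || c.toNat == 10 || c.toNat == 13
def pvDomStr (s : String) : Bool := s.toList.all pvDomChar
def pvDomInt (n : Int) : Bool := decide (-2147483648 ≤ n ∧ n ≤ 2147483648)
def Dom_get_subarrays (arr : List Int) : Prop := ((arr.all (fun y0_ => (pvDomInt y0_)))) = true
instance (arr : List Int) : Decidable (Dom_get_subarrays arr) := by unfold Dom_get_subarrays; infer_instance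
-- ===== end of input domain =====

-- B replaces A's single forward pass (current-run accumulator + final flush) by two staged
-- passes: a range filter computing the run-start cut indices, then slicing between adjacent
-- cuts; same O(n) cost, and B naturally returns [] on the empty list where A raises IndexError.


-- ===== PORT A =====
-- A's loop body: if arr[i] == arr[i-1] + 1 then subarray.append(arr[i]) else flush and restart.
-- pyGetD is exact here: under Pre_ every index 1 ≤ i < len(arr) is in range.
def astep (arr : List Int) (st : List (List Int) × List Int) (i : Int) :
    List (List Int) × List Int :=
  if PySem.List.pyGetD arr i 0 = PySem.List.pyGetD arr (i - 1) 0 + 1 then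
    (st.1, st.2 ++ [PySem.List.pyGetD arr i 0])
  else
    (st.1 ++ [st.2], [PySem.List.pyGetD arr i 0])

-- Literal port of A: subarray starts as [arr[0]] (IndexError on [] — outside Pre_, the match
-- returns [] there), 'for i in range(1, len(arr))' as a foldl over pyRange, final flush append.
def get_subarrays (arr : List Int) : List (List Int) :=
  match arr with
  | [] => []  -- arr[0] raises IndexError here; excluded by Pre_get_subarrays
  | a0 :: _ =>
    let st := (PySem.List.pyRange 1 (arr.length : Int) 1).foldl (astep arr) ([], [a0])
    st.1 ++ [st.2]

-- ===== PORT B =====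
-- Literal port of B: cuts = [i for i in range(n) if i == 0 or arr[i] != arr[i-1]+1] + [n],
-- then [arr[a:b] for a, b in zip(cuts, cuts[1:])].
def get_subarrays_alt (arr : List Int) : List (List Int) :=
  let n : Int := (arr.length : Int)
  let cuts : List Int :=
    ((PySem.List.pyRange 0 n 1).filter
      (fun i => decide (i = 0) ||
        decide (¬ PySem.List.pyGetD arr i 0 = PySem.List.pyGetD arr (i - 1) 0 + 1))) ++ [n]
  (cuts.zip (cuts.drop 1)).map (fun p => PySem.List.slice arr (some p.1) (some p.2))

-- ===== PRECONDITION & SPEC =====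
-- Pre_ excludes only the empty list, on which A raises IndexError (arr[0]).
def Pre_get_subarrays (arr : List Int) : Prop := arr ≠ []
instance (arr : List Int) : Decidable (Pre_get_subarrays arr) := by unfold Pre_get_subarrays; infer_instance
def pvWitness_get_subarrays : List Int := [1, 2, 5]

-- On the empty list A raises IndexError (it evaluates arr[0] before the loop) while B returns [].
def Raises_get_subarrays (arr : List Int) : Prop := arr = []
instance (arr : List Int) : Decidable (Raises_get_subarrays arr) := by unfold Raises_get_subarrays; infer_instance
def pvRaiseWitness_get_subarrays : List Int := []
def pvRaiseWitnessOut_get_subarrays : List (List Int) := []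

def Spec_get_subarrays (arr : List Int) (out : List (List Int)) : Prop := out = get_subarrays_alt arr
instance (arr : List Int) (out : List (List Int)) : Decidable (Spec_get_subarrays arr out) := by unfold Spec_get_subarrays; infer_instance

-- ===== CLAIM (what is proved, stated in full; the proofs are below) =====
def Claim_equal_get_subarrays : Prop := ∀ (arr : List Int), Dom_get_subarrays arr → Pre_get_subarrays arr → Spec_get_subarrays arr (get_subarrays arr)
def Claim_raises_get_subarrays : Prop := (∀ (arr : List Int), Dom_get_subarrays arr → Raises_get_subarrays arr → ¬ Pre_get_subarrays arr) ∧ (Dom_get_subarrays (pvRaiseWitness_get_subarrays) ∧ Raises_get_subarrays (pvRaiseWitness_get_subarrays) ∧ get_subarrays_alt (pvRaiseWitness_get_subarrays) = pvRaiseWitnessOut_get_subarrays)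

-- ===== LEMMAS AND PROOFS =====

-- Reference grouping function, structural recursion from the front.
def fgrp : List Int → List (List Int)
  | [] => []
  | x :: rest =>
    match fgrp rest with
    | (y :: ys) :: gs => if y = x + 1 then (x :: y :: ys) :: gs else [x] :: (y :: ys) :: gs
    | _ => [[x]]

theorem fgrp_cons (x : Int) (rest : List Int) :
    fgrp (x :: rest) =
      match fgrp rest with
      | (y :: ys) :: gs => if y = x + 1 then (x :: y :: ys) :: gs else [x] :: (y :: ys) :: gs
      | _ => [[x]] := rfl

theorem fgrp_cons_shape (x : Int) (rest : List Int) :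
    ∃ g gs, fgrp (x :: rest) = (x :: g) :: gs := by
  rw [fgrp_cons]
  rcases h : fgrp rest with _ | ⟨_ | ⟨y, ys⟩, gs⟩
  · exact ⟨[], [], rfl⟩
  · exact ⟨[], [], rfl⟩
  · by_cases hy : y = x + 1
    · exact ⟨y :: ys, gs, by simp [hy]⟩
    · exact ⟨[], (y :: ys) :: gs, by simp [hy]⟩

theorem fgrp_no_nil_head (rest : List Int) (gs : List (List Int)) (h : fgrp rest = [] :: gs) :
    False := by
  cases rest with
  | nil => simp [fgrp] at h
  | cons z r' => obtain ⟨g, gs', hg⟩ := fgrp_cons_shape z r'; rw [hg] at h; cases h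

theorem fgrp_eq_nil (rest : List Int) (h : fgrp rest = []) : rest = [] := by
  cases rest with
  | nil => rfl
  | cons z r' => obtain ⟨g, gs', hg⟩ := fgrp_cons_shape z r'; rw [hg] at h; cases h

-- ---- B-side: Nat-level cut/slice machinery ----
def gcond (arr : List Int) (i : Nat) : Bool :=
  i == 0 || !(decide (arr.getD i 0 = arr.getD (i - 1) 0 + 1))

def cutsN (arr : List Int) : List Nat := (List.range arr.length).filter (gcond arr)

def sl (arr : List Int) (cs : List Nat) : List (List Int) :=
  (cs.zip (cs.drop 1)).map (fun p => (arr.drop p.1).take (p.2 - p.1))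

theorem sl_cons2 (arr : List Int) (a b : Nat) (cs : List Nat) :
    sl arr (a :: b :: cs) = ((arr.drop a).take (b - a)) :: sl arr (b :: cs) := rfl

theorem sl_shift (x : Int) (rest : List Int) (cs : List Nat) :
    sl (x :: rest) (cs.map Nat.succ) = sl rest cs := by
  unfold sl
  rw [← List.map_drop, List.zip_map]
  rw [List.map_map]
  apply List.map_congr_left
  intro p _
  simp [Nat.succ_sub_succ]

theorem cutsN_succ (arr : List Int) (h : arr ≠ []) :
    cutsN arr = 0 :: ((List.range (arr.length - 1)).filter (fun j => gcond arr (j + 1))).map Nat.succ := by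
  match arr with
  | a :: t =>
    unfold cutsN
    rw [List.length_cons, List.range_succ_eq_map, List.filter_cons]
    have h0 : gcond (a :: t) 0 = true := by simp [gcond]
    rw [h0]
    simp only [List.filter_map, Nat.add_sub_cancel]
    rfl

theorem gcond_cons_succ_succ (x : Int) (rest : List Int) (k : Nat) :
    gcond (x :: rest) (k + 1 + 1) = gcond rest (k + 1) := by
  simp [gcond]

theorem cutsN_cons (x y : Int) (r : List Int) :
    cutsN (x :: y :: r) =
      0 :: ((if y = x + 1 then (cutsN (y :: r)).drop 1 else cutsN (y :: r)).map Nat.succ) := by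
  rw [cutsN_succ (x :: y :: r) (by simp), cutsN_succ (y :: r) (by simp)]
  simp only [List.length_cons, Nat.add_sub_cancel]
  congr 1
  rw [List.range_succ_eq_map, List.filter_cons, List.filter_map]
  have hcomp : ((fun j => gcond (x :: y :: r) (j + 1)) ∘ Nat.succ)
      = fun k => gcond (y :: r) (k + 1) := by
    funext k
    exact gcond_cons_succ_succ x (y :: r) k
  rw [hcomp]
  by_cases hy : y = x + 1
  · have h0 : gcond (x :: y :: r) (0 + 1) = false := by simp [gcond, hy]
    rw [h0]
    simp [hy]
  · have h0 : gcond (x :: y :: r) (0 + 1) = true := by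
      simp only [gcond]
      simp only [List.getD_cons_succ, List.getD_cons_zero, Nat.add_sub_cancel]
      simp [hy]
    rw [h0]
    simp [hy]

theorem sl_cuts_eq_fgrp (arr : List Int) (h : arr ≠ []) :
    sl arr (cutsN arr ++ [arr.length]) = fgrp arr := by
  induction arr with
  | nil => exact absurd rfl h
  | cons x rest ih =>
    cases rest with
    | nil =>
      simp [cutsN, gcond, sl, fgrp, List.range_one]
    | cons y r =>
      have hrest : (y :: r : List Int) ≠ [] := by simp
      have ih' := ih hrest
      have hhead := cutsN_succ (y :: r) hrest
      set d : List Nat := (cutsN (y :: r)).drop 1 with hd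
      have hsplit : cutsN (y :: r) = 0 :: d := by
        rw [hhead]; rw [hd, hhead]; simp
      rw [cutsN_cons]
      by_cases hy : y = x + 1
      · rw [if_pos hy]
        have hT : ∃ t0 T', d ++ [(y :: r).length] = t0 :: T' := by
          cases d with
          | nil => exact ⟨(y :: r).length, [], rfl⟩
          | cons a l => exact ⟨a, l ++ [(y :: r).length], rfl⟩
        obtain ⟨t0, T', hT⟩ := hT
        have hfull : (0 :: d.map Nat.succ) ++ [(x :: y :: r).length]
            = 0 :: (t0 + 1) :: T'.map Nat.succ := by
          simp only [List.length_cons, List.cons_append]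
          congr 1
          have : (d ++ [(y :: r).length]).map Nat.succ = (t0 :: T').map Nat.succ := by rw [hT]
          simpa [List.map_append, Nat.succ_eq_add_one] using this
        rw [hfull, sl_cons2]
        have hstep : sl (x :: y :: r) ((t0 + 1) :: T'.map Nat.succ) = sl (y :: r) (t0 :: T') := by
          have := sl_shift x (y :: r) (t0 :: T')
          simpa [Nat.succ_eq_add_one] using this
        rw [hstep]
        rw [hsplit, List.cons_append, hT, sl_cons2] at ih'
        simp only [List.drop_zero, Nat.sub_zero] at ih'
        simp only [List.drop_zero, Nat.sub_zero, List.take_succ_cons]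
        obtain ⟨g, gs, hg⟩ := fgrp_cons_shape y r
        rw [hg] at ih'
        have h1 : (y :: r).take t0 = y :: g := (List.cons.injEq _ _ _ _ ▸ ih').1
        have h2 : sl (y :: r) (t0 :: T') = gs := (List.cons.injEq _ _ _ _ ▸ ih').2
        rw [fgrp_cons, hg, h1, h2]
        simp [hy]
      · rw [if_neg hy]
        have hfull : (0 :: (cutsN (y :: r)).map Nat.succ) ++ [(x :: y :: r).length]
            = 0 :: 1 :: ((d ++ [(y :: r).length]).map Nat.succ) := by
          rw [hsplit]
          simp [Nat.succ_eq_add_one, List.map_append]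
        rw [hfull, sl_cons2]
        have hstep : sl (x :: y :: r) (1 :: (d ++ [(y :: r).length]).map Nat.succ)
            = sl (y :: r) (0 :: (d ++ [(y :: r).length])) := by
          have := sl_shift x (y :: r) (0 :: (d ++ [(y :: r).length]))
          simpa [Nat.succ_eq_add_one] using this
        rw [hstep, ← List.cons_append, ← hsplit, ih']
        obtain ⟨g, gs, hg⟩ := fgrp_cons_shape y r
        conv_rhs => rw [fgrp_cons, hg]
        rw [hg]
        simp [hy]

-- ---- B port equals the Nat-level machinery ----
theorem pred_eq (arr : List Int) (i : Nat) :
    (decide ((i : Int) = 0) ||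
      decide (¬ PySem.List.pyGetD arr (i : Int) 0 = PySem.List.pyGetD arr ((i : Int) - 1) 0 + 1))
    = gcond arr i := by
  cases i with
  | zero => simp [gcond]
  | succ j =>
    have h2 : ((j + 1 : Nat) : Int) - 1 = ((j : Nat) : Int) := by push_cast; ring
    rw [h2, PySem.List.pyGetD_natCast, PySem.List.pyGetD_natCast]
    have h0 : ¬ ((j : Int) + 1 = 0) := by omega
    simp [gcond, h0]

theorem alt_eq_sl (arr : List Int) :
    get_subarrays_alt arr = sl arr (cutsN arr ++ [arr.length]) := by
  unfold get_subarrays_alt sl cutsN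
  dsimp only
  rw [PySem.List.pyRange_zero_natCast]
  rw [List.filter_map]
  have hp : ((fun i => decide (i = 0) ||
      decide (¬ PySem.List.pyGetD arr i 0 = PySem.List.pyGetD arr (i - 1) 0 + 1)) ∘
        (fun n : Nat => (n : Int))) = gcond arr := by
    funext i
    exact pred_eq arr i
  rw [hp]
  have hcast : ((List.range arr.length).filter (gcond arr)).map (fun n : Nat => (n : Int))
      ++ [(arr.length : Int)]
      = (((List.range arr.length).filter (gcond arr)) ++ [arr.length]).map (fun n : Nat => (n : Int)) := by
    simp
  rw [hcast, ← List.map_drop, List.zip_map, List.map_map]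
  apply List.map_congr_left
  intro p _
  simp [PySem.List.slice_natCast]

theorem alt_eq_fgrp (arr : List Int) (h : arr ≠ []) : get_subarrays_alt arr = fgrp arr := by
  rw [alt_eq_sl, sl_cuts_eq_fgrp arr h]

-- ---- A-side: tail-recursive reformulation of A's loop carrying (subs, sub, prev). ----
def aloop (subs : List (List Int)) (sub : List Int) (prev : Int) : List Int → List (List Int)
  | [] => subs ++ [sub]
  | x :: rest =>
    if x = prev + 1 then aloop subs (sub ++ [x]) x rest
    else aloop (subs ++ [sub]) [x] x rest

theorem a_fold (rest : List Int) : ∀ (done : List Int) (subs : List (List Int))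
    (sub : List Int) (prev : Int), done.getLast? = some prev →
    (let st := (PySem.List.pyRange (done.length : Int) (((done ++ rest).length : Nat) : Int) 1).foldl
        (astep (done ++ rest)) (subs, sub)
     st.1 ++ [st.2]) = aloop subs sub prev rest := by
  induction rest with
  | nil =>
    intro done subs sub prev _
    simp [PySem.List.pyRange_one_eq_nil, aloop]
  | cons x rest' ih =>
    intro done subs sub prev hprev
    obtain ⟨init, hinit⟩ := List.getLast?_eq_some_iff.mp hprev
    have hlt : (done.length : Int) < (((done ++ x :: rest').length : Nat) : Int) := by
      push_cast [List.length_append, List.length_cons]; omega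
    rw [PySem.List.pyRange_one_cons hlt, List.foldl_cons]
    have hx : PySem.List.pyGetD (done ++ x :: rest') (done.length : Int) 0 = x := by
      simp [PySem.List.pyGetD]
    have hp : PySem.List.pyGetD (done ++ x :: rest') ((done.length : Int) - 1) 0 = prev := by
      subst hinit
      have hcast : ((((init ++ [prev]).length : Nat) : Int) - 1) = ((init.length : Nat) : Int) := by
        simp
      rw [hcast]
      have := PySem.List.pyGet?_append_length init (prev :: (x :: rest')) prev
      simp only [List.append_assoc, List.cons_append] at this ⊢
      simp [PySem.List.pyGetD]
    show (let st := List.foldl _ (astep (done ++ x :: rest') (subs, sub) (done.length : Int)) _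
          st.1 ++ [st.2]) = _
    rw [astep, hx, hp, aloop]
    by_cases hcond : x = prev + 1
    · rw [if_pos hcond, if_pos hcond]
      have h2 := ih (done ++ [x]) subs (sub ++ [x]) x (by simp)
      simp only [List.append_assoc, List.cons_append,
        List.length_append, List.length_cons, List.length_nil, List.nil_append] at h2 ⊢
      push_cast at h2 ⊢
      convert h2 using 4
    · rw [if_neg hcond, if_neg hcond]
      have h2 := ih (done ++ [x]) (subs ++ [sub]) [x] x (by simp)
      simp only [List.append_assoc, List.cons_append,
        List.length_append, List.length_cons, List.length_nil, List.nil_append] at h2 ⊢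
      push_cast at h2 ⊢
      convert h2 using 4

theorem aloop_fgrp (rest : List Int) : ∀ (subs : List (List Int)) (sub : List Int) (prev : Int),
    aloop subs sub prev rest =
      (match fgrp rest with
       | (y :: ys) :: gs =>
         if y = prev + 1 then subs ++ (sub ++ y :: ys) :: gs else subs ++ sub :: (y :: ys) :: gs
       | _ => subs ++ [sub]) := by
  induction rest with
  | nil => intro subs sub prev; simp [aloop, fgrp]
  | cons x rest' ih =>
    intro subs sub prev
    rw [aloop, fgrp_cons]
    rcases hr : fgrp rest' with _ | ⟨_ | ⟨y, ys⟩, gs⟩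
    · have : rest' = [] := fgrp_eq_nil rest' hr
      subst this
      by_cases hc : x = prev + 1 <;> simp [hc, aloop]
    · exact absurd hr (fun h => fgrp_no_nil_head rest' gs h)
    · simp only [ih, hr]
      by_cases hc : x = prev + 1
      · subst hc
        by_cases hy : y = (prev + 1) + 1 <;> simp [hy]
      · by_cases hy : y = x + 1 <;> simp [hc, hy]

theorem a_eq_fgrp (arr : List Int) (h : arr ≠ []) : get_subarrays arr = fgrp arr := by
  match arr with
  | a0 :: rest =>
    have hf := a_fold rest [a0] [] [a0] a0 (by simp)
    simp only [List.singleton_append, List.length_cons, List.length_nil, Nat.cast_add,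
      Nat.cast_one, zero_add] at hf
    have hgoal : get_subarrays (a0 :: rest) = aloop [] [a0] a0 rest := by
      show (let st := (PySem.List.pyRange 1 (((a0 :: rest).length : Nat) : Int) 1).foldl
              (astep (a0 :: rest)) ([], [a0])
            st.1 ++ [st.2]) = _
      simp only [List.length_cons, Nat.cast_add, Nat.cast_one]
      exact hf
    rw [hgoal, aloop_fgrp, fgrp_cons]
    rcases hr : fgrp rest with _ | ⟨_ | ⟨y, ys⟩, gs⟩
    · simp
    · exact absurd hr (fun hh => fgrp_no_nil_head rest gs hh)
    · by_cases hy : y = a0 + 1 <;> simp [hy]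

-- ===== VERDICT (by name: the statements are the Claim_ definitions above) =====
theorem get_subarrays_spec : Claim_equal_get_subarrays := by
  intro arr _ hpre
  unfold Spec_get_subarrays
  rw [a_eq_fgrp arr hpre, alt_eq_fgrp arr hpre]

theorem get_subarrays_raises : Claim_raises_get_subarrays := by
  unfold Claim_raises_get_subarrays
  exact ⟨fun arr _ hr => by simp [Raises_get_subarrays, Pre_get_subarrays] at hr ⊢; exact hr,
    by decide⟩

-- self-check: the crash-fix witness value stated in Claim_raises_ really is B's output there
theorem get_subarrays_raises_ok :
    get_subarrays_alt pvRaiseWitness_get_subarrays = pvRaiseWitnessOut_get_subarrays := by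
  have h := get_subarrays_raises
  unfold Claim_raises_get_subarrays at h
  exact h.2.2.2
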